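-- pv_equiv track=rewrite | github.com/txw-github/cc | parameter_checker4.py | _is_structural_left_bracket
-- ===== SOURCE A (Python) =====
-- def _is_structural_left_bracket(expression: str, pos: int) -> bool:
--     """
--     判断指定位置的左括号是否为结构性括号而非参数名中的括号
--     结构性左括号的特征：
--     1. 在表达式的开始
--     2. 在逻辑运算符之后
--     3. 在另一个结构性左括号之后
--     """
--     if pos == 0:
--         return True
--
--     # 查找前面的非空白字符
--     prev_pos = pos - 1
--     while prev_pos >= 0 and expression[prev_pos].isspace():
--         prev_pos -= 1
--
--     if prev_pos < 0:
--         return True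
--
--     # 检查前面是否是逻辑运算符
--     if prev_pos >= 2:
--         if expression[prev_pos - 2:prev_pos + 1].lower() == 'and' or expression[
--             prev_pos - 1:prev_pos + 1].lower() == 'or':
--             return True
--     if prev_pos >= 1:
--         if expression[prev_pos - 1:prev_pos + 1].lower() == 'or':
--             return True
--
--     # 检查前面是否是另一个左括号
--     if expression[prev_pos] == '(':
--         return True
--
--     return False
-- ===== SOURCE B (Python) =====
-- def _is_structural_left_bracket(expression: str, pos: int) -> bool:
--     # Forward single-pass state machine over expression[:pos]: carry the answer
--     # plus the last two raw characters; each non-space character refreshes the answer.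
--     if pos <= 0:
--         return True
--     ans = True
--     p2 = p1 = ''
--     for i in range(pos):
--         c = expression[i]
--         if not c.isspace():
--             ans = (c == '('
--                    or (p1 + c).lower() == 'or'
--                    or (p2 + p1 + c).lower() == 'and')
--         p2, p1 = p1, c
--     return ans
-- ===== Notes on version B (the rewrite author's own statement) =====
-- stated objective: alternative
-- what changed: Replaces A's backward walk (skip whitespace right-to-left from pos-1, then compare slices around the found index) with a forward single-pass state machine over expression[:pos] that carries the running answer and the last two raw characters, refreshing the answer at every non-space character.
import Mathlib
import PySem

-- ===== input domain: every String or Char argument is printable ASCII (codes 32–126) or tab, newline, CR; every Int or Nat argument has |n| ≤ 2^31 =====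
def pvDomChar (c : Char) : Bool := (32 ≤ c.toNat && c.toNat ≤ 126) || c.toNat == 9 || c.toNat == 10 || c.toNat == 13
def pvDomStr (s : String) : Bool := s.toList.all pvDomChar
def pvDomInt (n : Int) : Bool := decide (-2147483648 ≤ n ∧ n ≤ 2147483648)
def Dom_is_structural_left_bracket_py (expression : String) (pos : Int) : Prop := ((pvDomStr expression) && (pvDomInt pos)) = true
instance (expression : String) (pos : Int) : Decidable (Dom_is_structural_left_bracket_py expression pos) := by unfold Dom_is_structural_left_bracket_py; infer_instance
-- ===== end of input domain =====

-- B replaces A's backward whitespace-skip-and-slice check with a forward single-pass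
-- state machine carrying the running answer and the last two raw characters (alternative; same cost).

-- ===== PORT A =====
-- while prev_pos >= 0 and expression[prev_pos].isspace(): prev_pos -= 1
-- (the .getD 'x' default is never used inside Pre_: the index stays in range)
def pvSkipSpaces (cs : List Char) (i : Int) : Int :=
  if 0 ≤ i ∧ PySem.Chars.isspace ((PySem.List.pyGet? cs i).getD 'x') then
    pvSkipSpaces cs (i - 1)
  else i
termination_by (i + 1).toNat
decreasing_by omega

-- A's test chain once prev_pos ≥ 0 is known (the three 'if … return True' checks, in A's order)
def pvAtest (e : String) (prev : Int) : Bool :=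
  if 2 ≤ prev ∧
      (PySem.Str.lower (PySem.Str.slice e (some (prev - 2)) (some (prev + 1))) = "and"
       ∨ PySem.Str.lower (PySem.Str.slice e (some (prev - 1)) (some (prev + 1))) = "or") then true
  else if 1 ≤ prev ∧
      PySem.Str.lower (PySem.Str.slice e (some (prev - 1)) (some (prev + 1))) = "or" then true
  else if (PySem.Str.pyGet? e prev).getD 'x' = '(' then true
  else false

def is_structural_left_bracket_py (expression : String) (pos : Int) : Bool :=
  if pos = 0 then true
  else
    let prev := pvSkipSpaces expression.toList (pos - 1)
    if prev < 0 then true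
    else pvAtest expression prev

-- ===== PORT B =====
-- loop body: c = expression[i]; if not c.isspace(): ans = (c=='(' or (p1+c).lower()=='or'
-- or (p2+p1+c).lower()=='and');  p2, p1 = p1, c      (state = (ans, p2, p1))
def pvBstep (e : String) (st : Bool × String × String) (i : Int) : Bool × String × String :=
  let c := (PySem.Str.pyGet? e i).getD 'x'
  let ans :=
    if PySem.Chars.isspace c = false then
      (decide (c = '(')
        || decide (PySem.Str.lower (st.2.2.push c) = "or")
        || decide (PySem.Str.lower ((st.2.1 ++ st.2.2).push c) = "and"))
    else st.1
  (ans, st.2.2, String.singleton c)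

def is_structural_left_bracket_py_alt (expression : String) (pos : Int) : Bool :=
  if pos ≤ 0 then true
  else ((PySem.List.pyRange 0 pos 1).foldl (pvBstep expression) (true, "", "")).1

-- ===== PRECONDITION & SPEC =====
-- Pre_ excludes exactly the inputs where A raises IndexError (pos - 1 past the end of expression);
-- B raises IndexError on the same inputs.
def Pre_is_structural_left_bracket_py (expression : String) (pos : Int) : Prop :=
  pos ≤ (expression.length : Int)
instance (expression : String) (pos : Int) : Decidable (Pre_is_structural_left_bracket_py expression pos) := by
  unfold Pre_is_structural_left_bracket_py; infer_instance

def pvWitness_is_structural_left_bracket_py : String × Int := ("a and (", 6)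

def Spec_is_structural_left_bracket_py (expression : String) (pos : Int) (out : Bool) : Prop := out = is_structural_left_bracket_py_alt expression pos
instance (expression : String) (pos : Int) (out : Bool) : Decidable (Spec_is_structural_left_bracket_py expression pos out) := by unfold Spec_is_structural_left_bracket_py; infer_instance

-- ===== CLAIM (what is proved, stated in full; the proofs are below) =====
def Claim_equal_is_structural_left_bracket_py : Prop := ∀ (expression : String) (pos : Int), Dom_is_structural_left_bracket_py expression pos → Pre_is_structural_left_bracket_py expression pos → Spec_is_structural_left_bracket_py expression pos (is_structural_left_bracket_py expression pos)

-- ===== LEMMAS AND PROOFS =====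

theorem pv_toList_inj {s t : String} : s.toList = t.toList ↔ s = t :=
  ⟨fun h => by simpa [String.ofList_toList] using congrArg String.ofList h, fun h => by rw [h]⟩

theorem pv_take1_drop {l : List Char} {k : Nat} (hk : k < l.length) :
    (l.drop k).take 1 = [l[k]] :=
  List.take_one_drop_eq_of_lt_length hk

-- the string made of the single raw character at index j (empty for j < 0); B's p1/p2 values
def pvPstr (e : String) (j : Int) : String :=
  if j < 0 then "" else ((PySem.Str.pyGet? e j).map String.singleton).getD ""

-- the common spec both programs compute on the length-k prefix
def pvS (e : String) : Nat → Bool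
  | 0 => true
  | k + 1 =>
      if PySem.Chars.isspace (e.toList.getD k 'x') then pvS e k
      else pvAtest e (k : Int)

theorem pvPstr_at (e : String) (j : Nat) (h : j < e.toList.length) :
    pvPstr e (j : Int) = String.singleton e.toList[j] := by
  simp [pvPstr, PySem.Str.pyGet?_eq, List.getElem?_eq_getElem h]

theorem pv_skip_eq_S (e : String) (k : Nat) (hk : k ≤ e.toList.length) :
    (if pvSkipSpaces e.toList ((k : Int) - 1) < 0 then true
     else pvAtest e (pvSkipSpaces e.toList ((k : Int) - 1))) = pvS e k := by
  induction k with
  | zero =>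
    rw [pvSkipSpaces]
    simp [pvS]
  | succ k ih =>
    have hkl : k < e.toList.length := by omega
    have hidx : ((k + 1 : Nat) : Int) - 1 = (k : Int) := by push_cast; ring
    have hget : (PySem.List.pyGet? e.toList (k : Int)).getD 'x' = e.toList[k] := by
      rw [PySem.List.pyGet?_natCast]; simp [List.getElem?_eq_getElem hkl]
    have hS1 : pvS e (k + 1)
        = if PySem.Chars.isspace e.toList[k] then pvS e k else pvAtest e (k : Int) := by
      simp [pvS, List.getD, List.getElem?_eq_getElem hkl]
    rw [hidx, hS1]
    by_cases hsp : PySem.Chars.isspace e.toList[k] = true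
    · have hrec : pvSkipSpaces e.toList (k : Int) = pvSkipSpaces e.toList ((k : Int) - 1) := by
        rw [pvSkipSpaces, if_pos ⟨by omega, by rw [hget]; exact hsp⟩]
      rw [hrec, if_pos hsp]
      exact ih (by omega)
    · have hrec : pvSkipSpaces e.toList (k : Int) = (k : Int) := by
        rw [pvSkipSpaces, if_neg (fun hco => hsp (by rw [← hget]; exact hco.2))]
      rw [hrec, if_neg hsp, if_neg (show ¬ ((k : Int) < 0) by omega)]

-- B's refresh formula at a non-space index equals A's test chain there
theorem pv_test_eq (e : String) (k : Nat) (hk : k < e.toList.length) :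
    (decide (((PySem.Str.pyGet? e (k : Int)).getD 'x') = '(')
      || decide (PySem.Str.lower ((pvPstr e ((k : Int) - 1)).push
            ((PySem.Str.pyGet? e (k : Int)).getD 'x')) = "or")
      || decide (PySem.Str.lower ((pvPstr e ((k : Int) - 2) ++ pvPstr e ((k : Int) - 1)).push
            ((PySem.Str.pyGet? e (k : Int)).getD 'x')) = "and"))
    = pvAtest e (k : Int) := by
  have hc : (PySem.Str.pyGet? e (k : Int)).getD 'x' = e.toList[k] := by
    simp [PySem.Str.pyGet?_eq, PySem.List.pyGet?_natCast, List.getElem?_eq_getElem hk]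
  -- characterise the "or" tests
  have hor : (PySem.Str.lower ((pvPstr e ((k : Int) - 1)).push e.toList[k]) = "or")
      ↔ (1 ≤ (k : Int) ∧
         PySem.Str.lower (PySem.Str.slice e (some ((k : Int) - 1)) (some ((k : Int) + 1))) = "or") := by
    by_cases h1 : 1 ≤ k
    · have hk1 : k - 1 < e.toList.length := by omega
      have hp : pvPstr e ((k : Int) - 1) = String.singleton e.toList[k-1] := by
        have : ((k : Int) - 1) = ((k - 1 : Nat) : Int) := by omega
        rw [this, pvPstr_at e (k-1) hk1]
      have hsl : (PySem.Str.slice e (some ((k : Int) - 1)) (some ((k : Int) + 1))).toList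
          = [e.toList[k-1], e.toList[k]] := by
        rw [PySem.Str.toList_slice, PySem.Chars.slice_eq_listSlice]
        have h1' : ((k : Int) - 1) = ((k - 1 : Nat) : Int) := by omega
        have h2' : ((k : Int) + 1) = ((k + 1 : Nat) : Int) := by omega
        rw [h1', h2', PySem.List.slice_natCast]
        have : k + 1 - (k - 1) = 2 := by omega
        rw [this]
        rw [List.drop_eq_getElem_cons hk1]
        have hkk : k - 1 + 1 = k := by omega
        rw [hkk]
        simp [List.take_succ_cons, pv_take1_drop hk]
      constructor
      · intro h
        refine ⟨by omega, ?_⟩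
        rw [← pv_toList_inj] at h ⊢
        rw [PySem.Str.toList_lower, hsl]
        rw [PySem.Str.toList_lower, hp] at h
        simpa using h
      · rintro ⟨-, h⟩
        rw [← pv_toList_inj] at h ⊢
        rw [PySem.Str.toList_lower, hsl] at h
        rw [PySem.Str.toList_lower, hp]
        simpa using h
    · have hk0 : k = 0 := by omega
      subst hk0
      have hp : pvPstr e ((0 : Nat) - 1) = "" := by simp [pvPstr]
      constructor
      · intro h
        exfalso
        rw [← pv_toList_inj, PySem.Str.toList_lower, hp] at h
        have := congrArg List.length h
        simp [PySem.Chars.lower] at this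
      · rintro ⟨h, -⟩; omega
  -- characterise the "and" test
  have hand : (PySem.Str.lower ((pvPstr e ((k : Int) - 2) ++ pvPstr e ((k : Int) - 1)).push e.toList[k]) = "and")
      ↔ (2 ≤ (k : Int) ∧
         PySem.Str.lower (PySem.Str.slice e (some ((k : Int) - 2)) (some ((k : Int) + 1))) = "and") := by
    by_cases h2 : 2 ≤ k
    · have hk1 : k - 1 < e.toList.length := by omega
      have hk2 : k - 2 < e.toList.length := by omega
      have hp1 : pvPstr e ((k : Int) - 1) = String.singleton e.toList[k-1] := by
        have : ((k : Int) - 1) = ((k - 1 : Nat) : Int) := by omega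
        rw [this, pvPstr_at e (k-1) hk1]
      have hp2 : pvPstr e ((k : Int) - 2) = String.singleton e.toList[k-2] := by
        have : ((k : Int) - 2) = ((k - 2 : Nat) : Int) := by omega
        rw [this, pvPstr_at e (k-2) hk2]
      have hsl : (PySem.Str.slice e (some ((k : Int) - 2)) (some ((k : Int) + 1))).toList
          = [e.toList[k-2], e.toList[k-1], e.toList[k]] := by
        rw [PySem.Str.toList_slice, PySem.Chars.slice_eq_listSlice]
        have h1' : ((k : Int) - 2) = ((k - 2 : Nat) : Int) := by omega
        have h2' : ((k : Int) + 1) = ((k + 1 : Nat) : Int) := by omega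
        rw [h1', h2', PySem.List.slice_natCast]
        have : k + 1 - (k - 2) = 3 := by omega
        rw [this]
        rw [List.drop_eq_getElem_cons hk2]
        have ha : k - 2 + 1 = k - 1 := by omega
        rw [ha, List.drop_eq_getElem_cons hk1]
        have hb : k - 1 + 1 = k := by omega
        rw [hb]
        simp [List.take_succ_cons, pv_take1_drop hk]
      constructor
      · intro h
        refine ⟨by omega, ?_⟩
        rw [← pv_toList_inj] at h ⊢
        rw [PySem.Str.toList_lower, hsl]
        rw [PySem.Str.toList_lower, hp1, hp2] at h
        simpa using h
      · rintro ⟨-, h⟩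
        rw [← pv_toList_inj] at h ⊢
        rw [PySem.Str.toList_lower, hsl] at h
        rw [PySem.Str.toList_lower, hp1, hp2]
        simpa using h
    · constructor
      · intro h
        exfalso
        have e2 : pvPstr e ((k : Int) - 2) = "" := by
          simp [pvPstr, show (k : Int) - 2 < 0 by omega]
        have e1 : (pvPstr e ((k : Int) - 1)).toList.length ≤ 1 := by
          unfold pvPstr
          split
          · simp
          · cases PySem.Str.pyGet? e ((k : Int) - 1) <;> simp [String.singleton]
        have hlist : ((pvPstr e ((k : Int) - 2) ++ pvPstr e ((k : Int) - 1)).push e.toList[k]).toList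
            = (pvPstr e ((k : Int) - 1)).toList ++ [e.toList[k]] := by
          rw [e2]; simp
        rw [← pv_toList_inj, PySem.Str.toList_lower, hlist] at h
        have hl : (pvPstr e ((k : Int) - 1)).toList.length + 1 = 3 := by
          have := congrArg List.length h
          simpa [PySem.Chars.lower] using this
        omega
      · rintro ⟨h, -⟩; omega
  -- compare with A's chain
  rw [hc]
  unfold pvAtest
  rw [hc]
  by_cases hA : 2 ≤ (k : Int) ∧
      (PySem.Str.lower (PySem.Str.slice e (some ((k : Int) - 2)) (some ((k : Int) + 1))) = "and"
       ∨ PySem.Str.lower (PySem.Str.slice e (some ((k : Int) - 1)) (some ((k : Int) + 1))) = "or")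
  · rw [if_pos hA]
    rcases hA with ⟨h2, hcase | hcase⟩
    · simp [hand.mpr ⟨h2, hcase⟩]
    · simp [hor.mpr ⟨by omega, hcase⟩]
  · rw [if_neg hA]
    by_cases hO : 1 ≤ (k : Int) ∧
        PySem.Str.lower (PySem.Str.slice e (some ((k : Int) - 1)) (some ((k : Int) + 1))) = "or"
    · rw [if_pos hO]
      simp [hor.mpr hO]
    · rw [if_neg hO]
      have hor' : ¬ PySem.Str.lower ((pvPstr e ((k : Int) - 1)).push e.toList[k]) = "or" :=
        fun h => hO (hor.mp h)
      have hand' : ¬ PySem.Str.lower ((pvPstr e ((k : Int) - 2) ++ pvPstr e ((k : Int) - 1)).push e.toList[k]) = "and" := by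
        intro h
        rcases hand.mp h with ⟨h2, hc'⟩
        exact hA ⟨h2, Or.inl hc'⟩
      by_cases hlb : e.toList[k] = '('
      · simp [hlb]
      · simp [hlb, hor', hand']

theorem pv_fold_eq (e : String) (k : Nat) (hk : k ≤ e.toList.length) :
    (PySem.List.pyRange 0 (k : Int) 1).foldl (pvBstep e) (true, "", "")
      = (pvS e k, pvPstr e ((k : Int) - 2), pvPstr e ((k : Int) - 1)) := by
  induction k with
  | zero =>
    rw [PySem.List.pyRange_one_eq_nil (by omega)]
    simp [pvS, pvPstr]
  | succ k ih =>
    have hkl : k < e.toList.length := by omega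
    have hcast : ((k + 1 : Nat) : Int) = (k : Int) + 1 := by push_cast; ring
    rw [hcast, PySem.List.pyRange_one_succ_right (by omega), List.foldl_append,
      ih (by omega)]
    simp only [List.foldl_cons, List.foldl_nil]
    have hc : (PySem.Str.pyGet? e (k : Int)).getD 'x' = e.toList[k] := by
      simp [PySem.Str.pyGet?_eq, PySem.List.pyGet?_natCast, List.getElem?_eq_getElem hkl]
    have hgetD : e.toList.getD k 'x' = e.toList[k] := by
      simp [List.getD, List.getElem?_eq_getElem hkl]
    have hp1 : String.singleton ((PySem.Str.pyGet? e (k : Int)).getD 'x')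
        = pvPstr e ((k : Int) + 1 - 1) := by
      rw [hc]
      have : (k : Int) + 1 - 1 = ((k : Nat) : Int) := by ring
      rw [this, pvPstr_at e k hkl]
    have hp2 : ((k : Int) + 1 - 2) = (k : Int) - 1 := by ring
    unfold pvBstep
    by_cases hsp : PySem.Chars.isspace ((PySem.Str.pyGet? e (k : Int)).getD 'x') = true
    · simp only [hsp]
      have hsp2 : PySem.Chars.isspace e.toList[k] = true := by rw [← hc]; exact hsp
      have hS : pvS e (k + 1) = pvS e k := by
        simp [pvS, List.getD, List.getElem?_eq_getElem hkl, hsp2]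
      rw [hS, ← hp1, hp2]
      simp
    · have hsp' : PySem.Chars.isspace ((PySem.Str.pyGet? e (k : Int)).getD 'x') = false :=
        Bool.not_eq_true _ ▸ hsp
      simp only [hsp']
      have hsp2 : PySem.Chars.isspace e.toList[k] = false := by rw [← hc]; exact hsp'
      have hS : pvS e (k + 1) = pvAtest e (k : Int) := by
        simp [pvS, List.getD, List.getElem?_eq_getElem hkl, hsp2]
      rw [hS, ← hp1, hp2]
      have := pv_test_eq e k hkl
      rw [hc] at this ⊢
      simp only [← this]
      simp

-- ===== VERDICT (statements are the Claim_ definitions above) =====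
theorem is_structural_left_bracket_py_spec : Claim_equal_is_structural_left_bracket_py := by
  intro e pos _ hpre
  unfold Pre_is_structural_left_bracket_py at hpre
  unfold Spec_is_structural_left_bracket_py
  unfold is_structural_left_bracket_py is_structural_left_bracket_py_alt
  by_cases hp : pos ≤ 0
  · rw [if_pos hp]
    by_cases h0 : pos = 0
    · rw [if_pos h0]
    · rw [if_neg h0]
      have hstop : pvSkipSpaces e.toList (pos - 1) = pos - 1 := by
        rw [pvSkipSpaces]; rw [if_neg]; rintro ⟨h1, -⟩; omega
      simp only [hstop]
      rw [if_pos (by omega)]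
  · rw [if_neg hp, if_neg (by omega : ¬ pos = 0)]
    obtain ⟨k, hkk⟩ : ∃ k : Nat, (k : Int) = pos := ⟨pos.toNat, Int.toNat_of_nonneg (by omega)⟩
    have hlen : (e.length : Int) = (e.toList.length : Int) := by rw [String.length_toList]
    have hkle : k ≤ e.toList.length := by omega
    rw [← hkk, pv_fold_eq e k hkle]
    exact pv_skip_eq_S e k hkle
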